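-- pv_equiv track=rewrite | github.com/mabinogi233/works | CQUOJ/杨辉三角.py | erxiangshixishu
-- ===== SOURCE A (Python) =====
-- def erxiangshixishu(n):
--     if n==0:
--         list=[1]
--         return list
--     else:
--         list=[]
--         list.append(1)
--         comb_old=1
--         for k in range(1,n):
--             comb=jisuanjiecheng(n)//(jisuanjiecheng(k)*jisuanjiecheng(n-k))
--             if comb_old>=comb:
--                 break
--             comb_old=comb
--             list.append(comb)
--         if n % 2!=0:
--             for i in range(len(list)-1,-1,-1):
--                 list.append(list[i])
--         else:
--             for i in range(len(list)-2,-1,-1):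
--                 list.append(list[i])
--         return list
--
-- def jisuanjiecheng(n):
--     jiecheng=1
--     for i in range(1,n+1):
--         jiecheng=jiecheng*i
--     return jiecheng
-- ===== SOURCE B (Python) =====
-- def erxiangshixishu(n):
--     half = [1]
--     c = 1
--     for k in range(1, n // 2 + 1):
--         c = c * (n - k + 1) // k
--         half.append(c)
--     if n % 2 != 0:
--         return half + half[::-1]
--     return half + half[:-1][::-1]
-- ===== Notes on version B (the rewrite author's own statement) =====
-- stated objective: faster
-- what changed: Instead of computing three full factorials per column and dividing (with a break test to find the peak), B builds the first half of the row with the incremental recurrence C(n,k)=C(n,k-1)*(n-k+1)//k up to k=n//2 and mirrors it by slicing.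
import Mathlib
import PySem

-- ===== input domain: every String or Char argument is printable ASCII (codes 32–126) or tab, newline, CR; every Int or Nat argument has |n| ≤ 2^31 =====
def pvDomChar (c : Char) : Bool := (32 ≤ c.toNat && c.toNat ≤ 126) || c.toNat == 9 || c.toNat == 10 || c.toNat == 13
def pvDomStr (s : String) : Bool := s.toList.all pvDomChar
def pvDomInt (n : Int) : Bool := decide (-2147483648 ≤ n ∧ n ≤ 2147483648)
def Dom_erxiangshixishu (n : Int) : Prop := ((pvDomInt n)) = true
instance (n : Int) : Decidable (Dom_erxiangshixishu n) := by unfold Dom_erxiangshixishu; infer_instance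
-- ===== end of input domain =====

-- B replaces per-column factorial computations (with a break test to find the row's peak)
-- by the incremental recurrence C(n,k)=C(n,k-1)*(n-k+1)//k up to k=n//2, then mirrors: faster.


-- ===== PORT A =====
-- helper: jisuanjiecheng(n) = product of range(1, n+1)
def jisuanjiecheng (n : Int) : Int :=
  (PySem.List.pyRange 1 (n + 1) 1).foldl (fun jiecheng i => jiecheng * i) 1

-- the 'for k in range(1, n)' loop with its break, carrying (list, comb_old)
def loopA (n : Int) : List Int → List Int × Int → List Int × Int
  | [], st => st
  | k :: ks, (lst, comb_old) =>
      let comb := PySem.Int.floordiv (jisuanjiecheng n) (jisuanjiecheng k * jisuanjiecheng (n - k))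
      if comb_old ≥ comb then (lst, comb_old)
      else loopA n ks (lst ++ [comb], comb)

-- the mirror loop 'for i in range(…, -1, -1): list.append(list[i])'; every read index is
-- nonnegative and below the original length, so the pyGetD default 0 is never used
def mirrorLoop (idxs : List Int) (lst : List Int) : List Int :=
  idxs.foldl (fun acc i => acc ++ [PySem.List.pyGetD acc i 0]) lst

def erxiangshixishu (n : Int) : List Int :=
  if n == 0 then [1]
  else
    let st := loopA n (PySem.List.pyRange 1 n 1) ([1], 1)
    if PySem.Int.mod n 2 ≠ 0 then
      mirrorLoop (PySem.List.pyRange ((st.1.length : Int) - 1) (-1) (-1)) st.1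
    else
      mirrorLoop (PySem.List.pyRange ((st.1.length : Int) - 2) (-1) (-1)) st.1

-- ===== PORT B =====
def erxiangshixishu_alt (n : Int) : List Int :=
  let st := (PySem.List.pyRange 1 (PySem.Int.floordiv n 2 + 1) 1).foldl
      (fun (st : List Int × Int) k =>
        let c := PySem.Int.floordiv (st.2 * (n - k + 1)) k
        (st.1 ++ [c], c)) ([1], 1)
  if PySem.Int.mod n 2 ≠ 0 then st.1 ++ st.1.reverse
  else st.1 ++ st.1.dropLast.reverse

-- ===== PRECONDITION & SPEC =====
def Spec_erxiangshixishu (n : Int) (out : List Int) : Prop := out = erxiangshixishu_alt n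
instance (n : Int) (out : List Int) : Decidable (Spec_erxiangshixishu n out) := by unfold Spec_erxiangshixishu; infer_instance

-- ===== CLAIM (what is proved, stated in full; the proofs are below) =====
def Claim_equal_erxiangshixishu : Prop := ∀ (n : Int), Dom_erxiangshixishu n → Spec_erxiangshixishu n (erxiangshixishu n)

-- ===== LEMMAS AND PROOFS =====

-- the half-row both loops build: [C(N,0), …, C(N, N/2)]
def rowHalf (N : Nat) : List Int := (List.range (N / 2 + 1)).map (fun k => (N.choose k : Int))

theorem jisuanjiecheng_natCast (m : Nat) : jisuanjiecheng (m : Int) = (m.factorial : Int) := by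
  induction m with
  | zero => simp [jisuanjiecheng, PySem.List.pyRange_one_eq_nil, Nat.factorial]
  | succ m ih =>
      have h : jisuanjiecheng ((m + 1 : Nat) : Int)
          = (PySem.List.pyRange 1 ((m : Int) + 1) 1 ++ [(m : Int) + 1]).foldl
              (fun jiecheng i => jiecheng * i) 1 := by
        have : ((m + 1 : Nat) : Int) + 1 = ((m : Int) + 1) + 1 := by push_cast; ring
        rw [jisuanjiecheng, this, PySem.List.pyRange_one_succ_right (by omega)]
      rw [h, List.foldl_append]
      simp only [List.foldl]
      rw [show (PySem.List.pyRange 1 ((m:Int)+1) 1).foldl (fun jiecheng i => jiecheng * i) 1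
            = jisuanjiecheng (m : Int) from rfl, ih]
      push_cast [Nat.factorial_succ]; ring

theorem combA_eq_choose (N k : Nat) (hk : k ≤ N) :
    PySem.Int.floordiv (jisuanjiecheng (N : Int))
      (jisuanjiecheng (k : Int) * jisuanjiecheng ((N : Int) - (k : Int)))
      = (N.choose k : Int) := by
  have hNk : ((N : Int) - (k : Int)) = ((N - k : Nat) : Int) := by omega
  rw [hNk, jisuanjiecheng_natCast, jisuanjiecheng_natCast, jisuanjiecheng_natCast]
  have : (Nat.factorial k : Int) * (Nat.factorial (N - k) : Int)
      = ((Nat.factorial k * Nat.factorial (N - k) : Nat) : Int) := by push_cast; ring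
  rw [this, PySem.Int.floordiv_natCast, Nat.choose_eq_factorial_div_factorial hk]

-- strict increase before the middle: k < N/2 → C(N,k) < C(N,k+1)
theorem choose_lt_succ_of_lt_half (N k : Nat) (h : k < N / 2) :
    N.choose k < N.choose (k + 1) := by
  have hkN : k + 1 ≤ N := by omega
  have hpos : 0 < N.choose k := Nat.choose_pos (by omega)
  have heq := Nat.choose_succ_right_eq N k
  have hgt : k + 1 < N - k := by omega
  nlinarith [heq, hpos, Nat.choose_pos hkN]

-- non-increase at the step past the middle: C(N, N/2+1) ≤ C(N, N/2)
theorem choose_succ_half_le (N : Nat) (h : N / 2 + 1 ≤ N) :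
    N.choose (N / 2 + 1) ≤ N.choose (N / 2) := by
  have heq := Nat.choose_succ_right_eq N (N / 2)
  have hle : N - N / 2 ≤ N / 2 + 1 := by omega
  have : N.choose (N / 2 + 1) * (N / 2 + 1) ≤ N.choose (N / 2) * (N / 2 + 1) := by
    calc N.choose (N / 2 + 1) * (N / 2 + 1) = N.choose (N / 2) * (N - N / 2) := heq
      _ ≤ N.choose (N / 2) * (N / 2 + 1) := Nat.mul_le_mul_left _ hle
  exact Nat.le_of_mul_le_mul_right this (by omega)

theorem range_map_succ (j : Nat) (f : Nat → Int) :
    (List.range (j + 1)).map f = (List.range j).map f ++ [f j] := by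
  rw [List.range_succ, List.map_append]; rfl

-- A's loop invariant: from column k (1 ≤ k ≤ N/2+1) with the first k entries built,
-- the loop finishes with exactly the half row
theorem loopA_inv (N : Nat) :
    ∀ (m k : Nat), k = N / 2 + 1 - m → 1 ≤ k → k ≤ N / 2 + 1 →
    (loopA (N : Int) (PySem.List.pyRange (k : Int) (N : Int) 1)
      ((List.range k).map (fun j => (N.choose j : Int)), (N.choose (k - 1) : Int))).1
      = rowHalf N := by
  intro m
  induction m with
  | zero =>
      intro k hk h1 h2
      have hk' : k = N / 2 + 1 := by omega
      subst hk'
      by_cases hbig : N ≤ N / 2 + 1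
      · rw [PySem.List.pyRange_one_eq_nil (by exact_mod_cast hbig)]
        simp [loopA, rowHalf]
      · rw [not_le] at hbig
        rw [PySem.List.pyRange_one_cons (by exact_mod_cast hbig)]
        show (loopA _ _ (_, _)).1 = _
        rw [loopA]
        have hc := combA_eq_choose N (N / 2 + 1) (by omega)
        simp only [hc]
        have hle : (N.choose (N / 2 + 1) : Int) ≤ (N.choose (N / 2 + 1 - 1) : Int) := by
          exact_mod_cast (by simpa using choose_succ_half_le N (by omega))
        rw [if_pos hle]
        simp [rowHalf]
  | succ m ih =>
      intro k hk h1 h2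
      by_cases hstop : k = N / 2 + 1
      · subst hstop
        by_cases hbig : N ≤ N / 2 + 1
        · rw [PySem.List.pyRange_one_eq_nil (by exact_mod_cast hbig)]
          simp [loopA, rowHalf]
        · rw [not_le] at hbig
          rw [PySem.List.pyRange_one_cons (by exact_mod_cast hbig)]
          show (loopA _ _ (_, _)).1 = _
          rw [loopA]
          have hc := combA_eq_choose N (N / 2 + 1) (by omega)
          simp only [hc]
          have hle : (N.choose (N / 2 + 1) : Int) ≤ (N.choose (N / 2 + 1 - 1) : Int) := by
            exact_mod_cast (by simpa using choose_succ_half_le N (by omega))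
          rw [if_pos hle]
          simp [rowHalf]
      · have hkmid : k ≤ N / 2 := by omega
        have hkN : k < N := by omega
        rw [PySem.List.pyRange_one_cons (by exact_mod_cast hkN)]
        show (loopA _ _ (_, _)).1 = _
        rw [loopA]
        have hc := combA_eq_choose N k (by omega)
        simp only [hc]
        have hlt : (N.choose (k - 1) : Int) < (N.choose k : Int) := by
          exact_mod_cast (by simpa [Nat.sub_add_cancel h1] using
            choose_lt_succ_of_lt_half N (k - 1) (by omega))
        rw [if_neg (by omega)]
        have hrange : ((List.range k).map (fun j => (N.choose j : Int))) ++ [(N.choose k : Int)]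
            = (List.range (k + 1)).map (fun j => (N.choose j : Int)) :=
          (range_map_succ k _).symm
        rw [hrange]
        have := ih (k + 1) (by omega) (by omega) (by omega)
        simpa [Nat.add_sub_cancel] using this

-- B's loop invariant: after processing columns 1..j the pair is (first j+1 entries, C(N,j))
theorem loopB_inv (N : Nat) :
    ∀ (j : Nat), j ≤ N / 2 →
    (PySem.List.pyRange 1 ((j : Int) + 1) 1).foldl
        (fun (st : List Int × Int) k =>
          let c := PySem.Int.floordiv (st.2 * ((N : Int) - k + 1)) k
          (st.1 ++ [c], c)) ([1], 1)
      = ((List.range (j + 1)).map (fun i => (N.choose i : Int)), (N.choose j : Int)) := by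
  intro j
  induction j with
  | zero =>
      intro _
      rw [show ((0 : Nat) : Int) + 1 = 1 from rfl, PySem.List.pyRange_one_eq_nil le_rfl]
      simp
  | succ j ih =>
      intro hj
      have hstep : ((j + 1 : Nat) : Int) + 1 = ((j : Int) + 1) + 1 := by push_cast; ring
      rw [hstep, PySem.List.pyRange_one_succ_right (by omega), List.foldl_append,
        ih (by omega)]
      simp only [List.foldl]
      have hjN : j + 1 ≤ N := by omega
      have harg : (N : Int) - ((j : Int) + 1) + 1 = ((N - j : Nat) : Int) := by omega
      have hc : PySem.Int.floordiv ((N.choose j : Int) * ((N : Int) - ((j : Int) + 1) + 1))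
          ((j : Int) + 1) = (N.choose (j + 1) : Int) := by
        rw [harg]
        have hnat : N.choose j * (N - j) = N.choose (j + 1) * (j + 1) :=
          (Nat.choose_succ_right_eq N j).symm
        have hnum : (N.choose j : Int) * ((N - j : Nat) : Int)
            = ((N.choose (j + 1) * (j + 1) : Nat) : Int) := by
          rw [← hnat]; push_cast; ring
        have hden : ((j : Int) + 1) = ((j + 1 : Nat) : Int) := by push_cast; ring
        rw [hnum, hden, PySem.Int.floordiv_natCast, Nat.mul_div_cancel _ (by omega)]
      simp only [hc]
      rw [← range_map_succ]

-- the mirror loop on indices j-1 … 0 appends the reverse of the first j originals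
theorem mirrorLoop_take (lst : List Int) :
    ∀ (j : Nat) (ext : List Int), j ≤ lst.length →
    mirrorLoop (PySem.List.pyRange ((j : Int) - 1) (-1) (-1)) (lst ++ ext)
      = lst ++ ext ++ (lst.take j).reverse := by
  intro j
  induction j with
  | zero =>
      intro ext _
      rw [mirrorLoop, show ((0 : Nat) : Int) - 1 = -1 from rfl,
        PySem.List.pyRange_neg_one_eq_nil le_rfl]
      simp
  | succ j ih =>
      intro ext hj
      have hcons : PySem.List.pyRange (((j + 1 : Nat) : Int) - 1) (-1) (-1)
          = (j : Int) :: PySem.List.pyRange ((j : Int) - 1) (-1) (-1) := by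
        have h1 : (((j + 1 : Nat) : Int) - 1) = (j : Int) := by push_cast; ring
        rw [h1, PySem.List.pyRange_neg_one_cons (by omega)]
      rw [mirrorLoop, hcons]
      simp only [List.foldl]
      have hjlt : j < lst.length := by omega
      have hget : PySem.List.pyGetD (lst ++ ext) ((j : Int)) 0 = lst[j] := by
        rw [PySem.List.pyGetD_natCast, List.getD_eq_getElem?_getD,
          List.getElem?_append_left hjlt, List.getElem?_eq_getElem hjlt]
        rfl
      rw [hget, List.append_assoc lst ext [lst[j]]]
      have := ih (ext ++ [lst[j]]) (by omega)
      rw [mirrorLoop] at this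
      rw [this]
      have htake : (lst.take (j + 1)).reverse = lst[j] :: (lst.take j).reverse := by
        rw [List.take_add_one, List.getElem?_eq_getElem hjlt]
        simp
      rw [htake]
      simp

theorem rowHalf_length (N : Nat) : (rowHalf N).length = N / 2 + 1 := by
  simp [rowHalf]

-- main case: positive n
theorem main_pos (N : Nat) (hN : 1 ≤ N) :
    erxiangshixishu (N : Int) = erxiangshixishu_alt (N : Int) := by
  have hA1 : (loopA (N : Int) (PySem.List.pyRange 1 (N : Int) 1) ([1], 1)).1 = rowHalf N := by
    have := loopA_inv N (N / 2) 1 (by omega) (by omega) (by omega)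
    simpa using this
  have hhalf : (PySem.List.pyRange 1 (PySem.Int.floordiv (N : Int) 2 + 1) 1).foldl
      (fun (st : List Int × Int) k =>
        let c := PySem.Int.floordiv (st.2 * ((N : Int) - k + 1)) k
        (st.1 ++ [c], c)) ([1], 1) = (rowHalf N, (N.choose (N / 2) : Int)) := by
    have hdiv : PySem.Int.floordiv (N : Int) 2 = ((N / 2 : Nat) : Int) :=
      PySem.Int.floordiv_natCast N 2
    rw [hdiv]
    exact loopB_inv N (N / 2) le_rfl
  rw [erxiangshixishu, erxiangshixishu_alt, if_neg (by simp; omega)]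
  simp only [hA1, hhalf]
  by_cases hodd : PySem.Int.mod (N : Int) 2 ≠ 0
  · rw [if_pos hodd, if_pos hodd]
    have hmir := mirrorLoop_take (rowHalf N) (N / 2 + 1) [] (by rw [rowHalf_length])
    have hlen : ((rowHalf N).length : Int) - 1 = ((N / 2 + 1 : Nat) : Int) - 1 := by
      rw [rowHalf_length]
    rw [hlen]
    simp only [List.append_nil] at hmir
    rw [hmir, List.take_of_length_le (by rw [rowHalf_length])]
  · rw [if_neg hodd, if_neg hodd]
    have hmir := mirrorLoop_take (rowHalf N) (N / 2) [] (by rw [rowHalf_length]; omega)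
    have hlen : ((rowHalf N).length : Int) - 2 = ((N / 2 : Nat) : Int) - 1 := by
      rw [rowHalf_length]; push_cast; ring
    rw [hlen]
    simp only [List.append_nil] at hmir
    rw [hmir, List.dropLast_eq_take, rowHalf_length, Nat.add_sub_cancel]

-- degenerate case: negative n (both loops run zero iterations, list = [1])
theorem main_neg (n : Int) (hn : n < 0) :
    erxiangshixishu n = erxiangshixishu_alt n := by
  have hA : PySem.List.pyRange 1 n 1 = [] := PySem.List.pyRange_one_eq_nil (by omega)
  have hfd : PySem.Int.floordiv n 2 + 1 ≤ 0 := by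
    rw [PySem.Int.floordiv_eq_ediv_of_pos (by omega)]; omega
  have hB : PySem.List.pyRange 1 (PySem.Int.floordiv n 2 + 1) 1 = [] :=
    PySem.List.pyRange_one_eq_nil (by omega)
  rw [erxiangshixishu, erxiangshixishu_alt]
  rw [if_neg (show ¬((n == 0) = true) by simp; omega)]
  rw [hA, hB]
  simp only [loopA, List.foldl]
  by_cases hodd : PySem.Int.mod n 2 ≠ 0
  · rw [if_pos hodd, if_pos hodd]
    have := mirrorLoop_take [1] 1 [] (by simp)
    simpa using this
  · rw [if_neg hodd, if_neg hodd]
    have h0 : (([1] : List Int).length : Int) - 2 = -1 := by simp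
    rw [h0, mirrorLoop, PySem.List.pyRange_neg_one_eq_nil (by omega)]
    simp

-- ===== VERDICT (by name: the statement is the Claim_ definition above) =====
theorem erxiangshixishu_spec : Claim_equal_erxiangshixishu := by
  intro n _
  show erxiangshixishu n = erxiangshixishu_alt n
  rcases lt_trichotomy n 0 with hlt | heq | hgt
  · exact main_neg n hlt
  · subst heq; decide
  · have : n = ((n.toNat : Nat) : Int) := by omega
    rw [this]; exact main_pos n.toNat (by omega)
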